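-- pv_equiv track=rewrite | github.com/addison-king/dat129_ccac | Week 03/BG_DAT129_HW03_Jail_NO_CSV.py | _census_calc
-- ===== SOURCE A (Python) =====
-- def _census_calc(jail_dict, focus_date):
--     '''
--     Create an empty dict
--     First `for` loop:
--         Looking at each dict entry in the list...
--             `if` the race is not in our Races dict...
--                 add that race to our Races dict with a value of 0
--
--     Second `for` loop:
--         Looking at each dict entry in the list...
--             Looking at each key in the entry...
--                 `if` the 'entry'['key'] is our date:
--                     `if` the 'entry'["Race"] is in our races dict:
--                         The corresponding race key in our dict is +1
--
--     Args:
--         jail_dict (list): A list of dictionaries.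
--         focus_date (str): The hard-coded date we want to analize.
--
--     Returns:
--         races (dict): A dict containing KEY(races):VALUE(pop. size) pairs.
--
--     '''
--     races = {}
--
--     for entry in jail_dict:
--         if len(entry['Race']) > 0:
--             if entry['Race'] not in races:
--                 races[entry['Race']] = 0
--
--     for entry in jail_dict:
--         for key in entry:
--             if entry[key] == focus_date:
--                 if entry['Race'] in races:
--                     races[entry['Race']] += 1
--     return races
-- ===== SOURCE B (Python) =====
-- def _census_calc(jail_dict, focus_date):
--     order = dict.fromkeys(e['Race'] for e in jail_dict if e['Race'])
--     return {r: sum(list(e.values()).count(focus_date)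
--                    for e in jail_dict if e['Race'] == r)
--             for r in order}
-- ===== Notes on version B (the rewrite author's own statement) =====
-- stated objective: alternative
-- what changed: Replaces A's incremental per-entry dict accumulation with a group-by: build the ordered list of distinct non-empty races once, then for each race a separate comprehension sums the date-valued fields over that race's entries (per-key aggregation instead of per-entry counter updates).
import Mathlib
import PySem

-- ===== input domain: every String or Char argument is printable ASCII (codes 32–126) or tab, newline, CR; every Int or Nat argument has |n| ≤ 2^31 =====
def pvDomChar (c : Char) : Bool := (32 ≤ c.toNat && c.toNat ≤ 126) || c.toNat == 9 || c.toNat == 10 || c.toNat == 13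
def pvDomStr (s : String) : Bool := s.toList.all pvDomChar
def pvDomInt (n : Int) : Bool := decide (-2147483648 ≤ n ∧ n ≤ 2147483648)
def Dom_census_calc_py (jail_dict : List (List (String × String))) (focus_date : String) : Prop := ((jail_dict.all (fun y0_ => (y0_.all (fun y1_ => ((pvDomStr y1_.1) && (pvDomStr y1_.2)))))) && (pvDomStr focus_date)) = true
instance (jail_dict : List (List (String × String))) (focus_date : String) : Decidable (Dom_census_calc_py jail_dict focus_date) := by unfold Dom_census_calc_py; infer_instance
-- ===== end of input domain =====

-- B replaces A's incremental per-entry dict accumulation by a group-by: the ordered list of distinct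
-- non-empty races, then one per-race sum over that race's entries (alternative decomposition, same result).
-- Shared reading of a Python dict entry given as an association list (entries are Python dicts, so keys are
-- distinct; 'for key in entry' iterates the distinct keys in insertion order, entry[k] is the first match):

def pvGetOf (entry : List (String × String)) (k : String) : Option String :=
  (PySem.Dict.mk entry).get? k

def pvRace (entry : List (String × String)) : String :=
  (pvGetOf entry "Race").getD ""

def pvKeysOf (entry : List (String × String)) : List String :=
  PySem.List.dedup (entry.map Prod.fst)

-- ===== PORT A =====
-- first loop: register each non-empty race with count 0
def pvStepA1 (races : PySem.Dict String Int) (entry : List (String × String)) : PySem.Dict String Int :=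
  if 0 < PySem.Str.len (pvRace entry) then
    (if races.contains (pvRace entry) then races else races.insert (pvRace entry) 0)
  else races

-- second loop: for each key of the entry whose value is the focus date, bump the entry's race if registered
def pvStepA2 (focus_date : String) (races : PySem.Dict String Int) (entry : List (String × String)) : PySem.Dict String Int :=
  (pvKeysOf entry).foldl (fun races key =>
    if pvGetOf entry key == some focus_date then
      (if races.contains (pvRace entry) then races.modify (pvRace entry) 0 (· + 1) else races)
    else races) races

def census_calc_py (jail_dict : List (List (String × String))) (focus_date : String) : List (String × Int) :=
  (jail_dict.foldl (pvStepA2 focus_date) (jail_dict.foldl pvStepA1 PySem.Dict.empty)).items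

-- ===== PORT B =====
-- list(e.values()).count(focus_date)
def pvMatches (entry : List (String × String)) (focus_date : String) : Int :=
  ((pvKeysOf entry).countP (fun k => pvGetOf entry k == some focus_date) : Int)

-- order = dict.fromkeys(e['Race'] for e in jail_dict if e['Race'])
def pvRaceOrder (jail_dict : List (List (String × String))) : List String :=
  PySem.List.dedup ((jail_dict.map pvRace).filter (fun r => r ≠ ""))

-- sum(list(e.values()).count(focus_date) for e in jail_dict if e['Race'] == r)
def pvRaceTotal (jail_dict : List (List (String × String))) (focus_date : String) (r : String) : Int :=
  ((jail_dict.filter (fun e => pvRace e == r)).map (fun e => pvMatches e focus_date)).sum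

def census_calc_py_alt (jail_dict : List (List (String × String))) (focus_date : String) : List (String × Int) :=
  (pvRaceOrder jail_dict).map (fun r => (r, pvRaceTotal jail_dict focus_date r))

-- ===== PRECONDITION & SPEC =====
-- Pre_ excludes entries without a 'Race' key, on which the Python A raises KeyError.
def Pre_census_calc_py (jail_dict : List (List (String × String))) (_focus_date : String) : Prop :=
  ∀ e ∈ jail_dict, "Race" ∈ e.map Prod.fst
instance (jail_dict : List (List (String × String))) (focus_date : String) : Decidable (Pre_census_calc_py jail_dict focus_date) := by unfold Pre_census_calc_py; infer_instance

def pvWitness_census_calc_py : (List (List (String × String))) × String :=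
  ([[("Race", "BLACK"), ("Booked", "2020-01-01")], [("Race", "WHITE")]], "2020-01-01")

def Spec_census_calc_py (jail_dict : List (List (String × String))) (focus_date : String) (out : List (String × Int)) : Prop := out = census_calc_py_alt jail_dict focus_date
instance (jail_dict : List (List (String × String))) (focus_date : String) (out : List (String × Int)) : Decidable (Spec_census_calc_py jail_dict focus_date out) := by unfold Spec_census_calc_py; infer_instance

-- ===== CLAIM (what is proved, stated in full; the proofs are below) =====
def Claim_equal_census_calc_py : Prop := ∀ (jail_dict : List (List (String × String))) (focus_date : String), Dom_census_calc_py jail_dict focus_date → Pre_census_calc_py jail_dict focus_date → Spec_census_calc_py jail_dict focus_date (census_calc_py jail_dict focus_date)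

-- ===== LEMMAS AND PROOFS =====

-- Proof-side fused step (A's two passes collapse to this; B's group-by is then read off it).
def pvStepB (focus_date : String) (races : PySem.Dict String Int) (entry : List (String × String)) : PySem.Dict String Int :=
  let race := pvRace entry
  let races1 := if race ≠ "" ∧ ¬ races.contains race then races.insert race 0 else races
  if races1.contains race then races1.modify race 0 (· + pvMatches entry focus_date) else races1

theorem pv_len_pos_iff (s : String) : (0 < PySem.Str.len s) ↔ s ≠ "" := by
  rw [PySem.Str.len_eq, ne_eq, ← String.toList_eq_nil_iff, ← List.length_eq_zero_iff]
  omega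

theorem pv_modify_modify (D : PySem.Dict String Int) (r : String) (a b : Int) :
    (D.modify r 0 (· + a)).modify r 0 (· + b) = D.modify r 0 (· + (a + b)) := by
  unfold PySem.Dict.modify
  rw [PySem.Dict.getD_insert_self, PySem.Dict.insert_insert_self]
  ring_nf

theorem pv_insert_getD_self (D : PySem.Dict String Int) (r : String)
    (hnd : D.keys.Nodup) (h : D.contains r = true) :
    D.insert r (D.getD r 0) = D := by
  apply PySem.Dict.ext
  rw [PySem.Dict.items_insert_of_contains _ _ h]
  conv_rhs => rw [← List.map_id D.items]
  apply List.map_congr_left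
  intro p hp
  obtain ⟨k, v⟩ := p
  by_cases hk : k = r
  · subst hk
    have := PySem.Dict.getD_of_mem_items D hp hnd 0
    simp [this]
  · simp [hk]

theorem pv_modify_nodup (D : PySem.Dict String Int) (r : String) (f : Int → Int)
    (hnd : D.keys.Nodup) : (D.modify r 0 f).keys.Nodup := by
  unfold PySem.Dict.modify
  exact PySem.Dict.nodup_keys_insert _ _ _ hnd

theorem pv_insert_comm (d : PySem.Dict String Int) (r r' : String) (v : Int)
    (hr : d.contains r = true) (hr' : d.contains r' = false) :
    (d.insert r v).insert r' 0 = (d.insert r' 0).insert r v := by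
  have hne : r' ≠ r := fun h => by subst h; rw [hr] at hr'; exact absurd hr' (by simp)
  have h1 : (d.insert r v).contains r' = false := by
    rw [PySem.Dict.contains_insert]; simp [hne, hr']
  have h2 : (d.insert r' 0).contains r = true := by
    rw [PySem.Dict.contains_insert]; simp [hr]
  apply PySem.Dict.ext
  rw [PySem.Dict.items_insert_of_not_contains _ _ h1,
      PySem.Dict.items_insert_of_contains _ _ hr,
      PySem.Dict.items_insert_of_contains _ _ h2,
      PySem.Dict.items_insert_of_not_contains _ _ hr']
  rw [List.map_append]
  simp [hne]

theorem pv_inner_eq (e : List (String × String)) (fd r : String) (ks : List String)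
    (D : PySem.Dict String Int) (hnd : D.keys.Nodup) :
    ks.foldl (fun races key =>
        if pvGetOf e key == some fd then
          (if races.contains r then races.modify r 0 (· + 1) else races)
        else races) D
      = if D.contains r then D.modify r 0 (· + (ks.countP (fun k => pvGetOf e k == some fd) : Int)) else D := by
  induction ks generalizing D with
  | nil =>
    simp only [List.foldl_nil, List.countP_nil]
    by_cases hc : D.contains r = true
    · rw [if_pos hc]
      push_cast
      simp only [add_zero]
      unfold PySem.Dict.modify
      exact (pv_insert_getD_self D r hnd hc).symm
    · simp [hc]
  | cons k ks ih =>
    simp only [List.foldl_cons, List.countP_cons]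
    by_cases hP : (pvGetOf e k == some fd) = true
    · rw [if_pos hP]
      by_cases hc : D.contains r = true
      · rw [if_pos hc, ih _ (pv_modify_nodup D r _ hnd)]
        have hcm : (D.modify r 0 (· + 1)).contains r = true := by
          rw [PySem.Dict.contains_modify]; simp
        rw [if_pos hcm, if_pos hc, pv_modify_modify]
        congr 1
        funext x
        simp [hP]
        ring
      · rw [if_neg hc, ih _ hnd, if_neg hc, if_neg hc]
    · rw [if_neg hP, ih _ hnd]
      simp [hP]

theorem pv_pass1_nodup (l : List (List (String × String))) (d : PySem.Dict String Int)
    (hnd : d.keys.Nodup) : (l.foldl pvStepA1 d).keys.Nodup := by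
  induction l generalizing d with
  | nil => exact hnd
  | cons e l ih =>
    refine ih _ ?_
    unfold pvStepA1
    split_ifs with h1 h2
    · exact hnd
    · exact PySem.Dict.nodup_keys_insert _ _ _ hnd
    · exact hnd

theorem pv_pass1_mono (l : List (List (String × String))) (d : PySem.Dict String Int)
    (k : String) (h : d.contains k = true) : (l.foldl pvStepA1 d).contains k = true := by
  induction l generalizing d with
  | nil => exact h
  | cons e l ih =>
    refine ih _ ?_
    unfold pvStepA1
    split_ifs with h1 h2
    · exact h
    · rw [PySem.Dict.contains_insert]; simp [h]
    · exact h

theorem pv_pass1_empty (l : List (List (String × String))) (d : PySem.Dict String Int)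
    (h : d.contains "" = false) : (l.foldl pvStepA1 d).contains "" = false := by
  induction l generalizing d with
  | nil => exact h
  | cons e l ih =>
    refine ih _ ?_
    unfold pvStepA1
    split_ifs with h1 h2
    · exact h
    · rw [PySem.Dict.contains_insert]
      have hne : pvRace e ≠ "" := (pv_len_pos_iff _).mp h1
      simp only [h, Bool.or_false, beq_eq_false_iff_ne, ne_eq]
      exact fun hc => hne hc.symm
    · exact h

theorem pv_pass1_modify (l : List (List (String × String))) (d : PySem.Dict String Int)
    (r : String) (c : Int) (h : d.contains r = true) :
    l.foldl pvStepA1 (d.modify r 0 (· + c)) = (l.foldl pvStepA1 d).modify r 0 (· + c) := by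
  induction l generalizing d with
  | nil => rfl
  | cons e l ih =>
    simp only [List.foldl_cons]
    have hstep : pvStepA1 (d.modify r 0 (· + c)) e = (pvStepA1 d e).modify r 0 (· + c) := by
      unfold pvStepA1
      rw [PySem.Dict.contains_modify]
      by_cases h1 : 0 < PySem.Str.len (pvRace e)
      · rw [if_pos h1, if_pos h1]
        by_cases h2 : d.contains (pvRace e) = true
        · simp [h2]
        · have hne : pvRace e ≠ r := fun hc => by rw [hc] at h2; exact h2 h
          have h2f : d.contains (pvRace e) = false := by
            cases hcc : d.contains (pvRace e)
            · rfl
            · exact absurd hcc h2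
          rw [if_neg (by simp [hne, h2f]), if_neg h2]
          unfold PySem.Dict.modify
          rw [show (d.insert (pvRace e) (0:Int)).getD r 0 = d.getD r 0 from
                PySem.Dict.getD_insert_of_ne _ _ _ (Ne.symm hne)]
          exact pv_insert_comm d r (pvRace e) _ h h2f
      · rw [if_neg h1, if_neg h1]
    rw [hstep]
    refine ih _ ?_
    unfold pvStepA1
    split_ifs with h1 h2
    · exact h
    · rw [PySem.Dict.contains_insert]; simp [h]
    · exact h

theorem pv_stepB_eq (fd : String) (d : PySem.Dict String Int) (e : List (String × String)) :
    pvStepB fd d e =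
      (if (pvStepA1 d e).contains (pvRace e) then
        (pvStepA1 d e).modify (pvRace e) 0 (· + pvMatches e fd) else pvStepA1 d e) := by
  have hA : pvStepA1 d e = (if pvRace e ≠ "" ∧ ¬ d.contains (pvRace e) = true then d.insert (pvRace e) 0 else d) := by
    unfold pvStepA1
    by_cases hr : pvRace e = ""
    · have hl : ¬ 0 < PySem.Str.len (pvRace e) := by rw [pv_len_pos_iff]; simp [hr]
      rw [if_neg hl, if_neg (by simp [hr])]
    · have hl : 0 < PySem.Str.len (pvRace e) := (pv_len_pos_iff _).mpr hr
      rw [if_pos hl]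
      by_cases hc : d.contains (pvRace e) = true
      · rw [if_pos hc, if_neg (by simp [hc])]
      · rw [if_neg hc, if_pos ⟨hr, hc⟩]
  simp only [pvStepB]
  rw [← hA]

theorem pv_main (l : List (List (String × String))) (fd : String) (d : PySem.Dict String Int)
    (hnd : d.keys.Nodup) (he : d.contains "" = false) :
    l.foldl (pvStepB fd) d = l.foldl (pvStepA2 fd) (l.foldl pvStepA1 d) := by
  induction l generalizing d with
  | nil => rfl
  | cons e l ih =>
    simp only [List.foldl_cons]
    set r := pvRace e with hrdef
    set a := pvStepA1 d e with hadef
    have ha_nd : a.keys.Nodup := by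
      rw [hadef]; unfold pvStepA1
      split_ifs with h1 h2
      · exact hnd
      · exact PySem.Dict.nodup_keys_insert _ _ _ hnd
      · exact hnd
    have ha_e : a.contains "" = false := by
      rw [hadef]; unfold pvStepA1
      split_ifs with h1 h2
      · exact he
      · rw [PySem.Dict.contains_insert]
        have hne : pvRace e ≠ "" := (pv_len_pos_iff _).mp h1
        simp only [he, Bool.or_false, beq_eq_false_iff_ne, ne_eq]
        exact fun hc => hne hc.symm
      · exact he
    rw [pv_stepB_eq]
    by_cases hr0 : r = ""
    · have har : a.contains r = false := by rw [hr0]; exact ha_e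
      rw [if_neg (by rw [← hadef, ← hrdef]; simp [har])]
      rw [ih a ha_nd ha_e]
      congr 1
      unfold pvStepA2
      rw [pv_inner_eq e fd r _ _ (pv_pass1_nodup l a ha_nd)]
      rw [if_neg (by rw [hr0]; simp [pv_pass1_empty l a ha_e])]
    · have har : a.contains r = true := by
        rw [hadef]; unfold pvStepA1
        rw [if_pos ((pv_len_pos_iff _).mpr hr0)]
        split_ifs with h2
        · exact h2
        · exact PySem.Dict.contains_insert_self _ _ _
      rw [if_pos har]
      have hm_nd : (a.modify r 0 (· + pvMatches e fd)).keys.Nodup := pv_modify_nodup _ _ _ ha_nd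
      have hm_e : (a.modify r 0 (· + pvMatches e fd)).contains "" = false := by
        rw [PySem.Dict.contains_modify]
        simp only [ha_e, Bool.or_false, beq_eq_false_iff_ne, ne_eq]
        exact fun hc => hr0 hc.symm
      rw [ih _ hm_nd hm_e]
      rw [pv_pass1_modify l a r _ har]
      congr 1
      unfold pvStepA2
      rw [pv_inner_eq e fd r _ _ (pv_pass1_nodup l a ha_nd)]
      rw [if_pos (pv_pass1_mono l a r har)]
      rfl

-- total over the TAIL plus the recurrence used in the fold↔group-by bridge
theorem pv_total_cons (e : List (String × String)) (l : List (List (String × String)))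
    (fd r : String) :
    pvRaceTotal (e :: l) fd r
      = (if pvRace e == r then pvMatches e fd else 0) + pvRaceTotal l fd r := by
  unfold pvRaceTotal
  rw [List.filter_cons]
  by_cases h : (pvRace e == r) = true
  · simp [h]
  · simp [h]

theorem pv_ofList_filter {α : Type} [DecidableEq α] (p : α → Bool) (xs : List α) :
    PySem.Set.ofList (xs.filter p) = (PySem.Set.ofList xs).filter p := by
  induction xs with
  | nil => rfl
  | cons x xs ih =>
    rw [List.filter_cons, PySem.Set.ofList_cons]
    by_cases hp : p x = true
    · rw [if_pos hp, PySem.Set.ofList_cons, ih]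
      unfold PySem.Set.discard
      rw [List.filter_cons_of_pos hp, List.filter_filter, List.filter_filter]
      congr 1
      apply List.filter_congr
      intro y _
      rw [Bool.and_comm]
    · rw [if_neg hp, ih]
      unfold PySem.Set.discard
      rw [List.filter_cons_of_neg hp, List.filter_filter]
      apply List.filter_congr
      intro y _
      by_cases hy : y = x
      · subst hy
        simp only [hp]
        simp
      · simp [hy]

theorem pv_ofList_filter_ne {α : Type} [DecidableEq α] (xs : List α) (r : α) :
    PySem.Set.ofList (xs.filter (fun y => y ≠ r)) = PySem.Set.discard (PySem.Set.ofList xs) r := by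
  rw [pv_ofList_filter]
  unfold PySem.Set.discard
  apply List.filter_congr
  intro y _
  by_cases h : y = r
  · simp [h]
  · simp [h]

-- the fused fold, characterised as a group-by over the remaining list
theorem pv_fold_groupby (l : List (List (String × String))) (fd : String)
    (D : PySem.Dict String Int) (hnd : D.keys.Nodup) (he : D.contains "" = false) :
    (l.foldl (pvStepB fd) D).items
      = D.items.map (fun p => (p.1, p.2 + pvRaceTotal l fd p.1))
        ++ (PySem.Set.ofList ((l.map pvRace).filter
              (fun r => r ≠ "" ∧ ¬ D.contains r = true))).map (fun r => (r, pvRaceTotal l fd r)) := by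
  induction l generalizing D with
  | nil =>
    simp [pvRaceTotal]
  | cons e l ih =>
    simp only [List.foldl_cons, List.map_cons, List.filter_cons]
    rw [pv_stepB_eq]
    set r := pvRace e with hrdef
    by_cases hr0 : r = ""
    · -- empty race: dict unchanged, e's race filtered out, e contributes to no key
      have hstep : pvStepA1 D e = D := by
        unfold pvStepA1
        rw [if_neg (by rw [pv_len_pos_iff, ← hrdef]; simp [hr0])]
      rw [hstep, if_neg (by simp [hr0, he]), ih D hnd he]
      rw [if_neg (by simp [hr0])]
      congr 1
      · apply List.map_congr_left
        intro p hp
        have hkm : p.1 ∈ D.keys := by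
          unfold PySem.Dict.keys
          exact List.mem_map_of_mem hp
        have hne : (r == p.1) = false := by
          have hkne : p.1 ≠ "" := by
            intro hc
            have hco := (PySem.Dict.contains_iff_mem_keys D "").mpr (hc ▸ hkm)
            rw [he] at hco
            exact Bool.false_ne_true hco
          simp [hr0]
          intro hc; exact hkne hc
        rw [pv_total_cons, hne]
        simp
      · apply List.map_congr_left
        intro k hk
        have hk' : k ≠ "" := by
          rw [PySem.Set.mem_ofList, List.mem_filter] at hk
          have := hk.2; simp at this; exact this.1
        have hne : (r == k) = false := by simp [hr0]; intro hc; exact hk' hc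
        rw [pv_total_cons, hne]
        simp
    · -- non-empty race
      by_cases hc : D.contains r = true
      · -- already a key: modify it, filter drops e's race
        have hstep : pvStepA1 D e = D := by
          unfold pvStepA1
          rw [if_pos ((pv_len_pos_iff _).mpr hr0), if_pos hc]
        rw [hstep, if_pos hc]
        have hm_nd : (D.modify r 0 (· + pvMatches e fd)).keys.Nodup := pv_modify_nodup _ _ _ hnd
        have hm_e : (D.modify r 0 (· + pvMatches e fd)).contains "" = false := by
          rw [PySem.Dict.contains_modify]
          simp only [he, Bool.or_false, beq_eq_false_iff_ne, ne_eq]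
          exact fun h => hr0 h.symm
        rw [ih _ hm_nd hm_e]
        rw [if_neg (by simp [hc])]
        have hitems : (D.modify r 0 (· + pvMatches e fd)).items
            = D.items.map (fun p => if p.1 = r then (p.1, p.2 + pvMatches e fd) else p) := by
          unfold PySem.Dict.modify
          rw [PySem.Dict.items_insert_of_contains _ _ hc]
          apply List.map_congr_left
          intro p hp
          obtain ⟨k, v⟩ := p
          by_cases hk : k = r
          · subst hk
            have := PySem.Dict.getD_of_mem_items D hp hnd 0
            simp [this]
          · simp [hk]
        rw [hitems, List.map_map]
        congr 1
        · apply List.map_congr_left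
          intro p hp
          simp only [Function.comp_apply]
          by_cases hk : p.1 = r
          · rw [if_pos hk]
            simp only
            rw [pv_total_cons, hk]
            simp
            rw [if_pos hrdef.symm]
            ring
          · rw [if_neg hk]
            rw [pv_total_cons, show (r == p.1) = false by simp; exact fun hc2 => hk hc2.symm]
            simp
        · have hsame : ((l.map pvRace).filter (fun k => k ≠ "" ∧ ¬ (D.modify r 0 (· + pvMatches e fd)).contains k = true))
              = (l.map pvRace).filter (fun k => k ≠ "" ∧ ¬ D.contains k = true) := by
            apply List.filter_congr
            intro k _
            rw [PySem.Dict.contains_modify]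
            by_cases hk : k = r
            · subst hk; simp [hc]
            · simp [hk]
          rw [hsame]
          apply List.map_congr_left
          intro k hk
          rw [PySem.Set.mem_ofList, List.mem_filter] at hk
          have hkc : D.contains k = false := by
            have h2 := hk.2; simp at h2; exact h2.2
          have hkr : k ≠ r := by
            intro h
            rw [h, hc] at hkc
            exact absurd hkc (by decide)
          rw [pv_total_cons, show (r == k) = false by simp; exact fun h => hkr h.symm]
          simp
      · -- new key: appended with its whole-list total
        have hcf : D.contains r = false := by cases h : D.contains r; rfl; exact absurd h hc
        have hstep : pvStepA1 D e = D.insert r 0 := by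
          unfold pvStepA1
          rw [if_pos ((pv_len_pos_iff _).mpr hr0), if_neg hc]
        rw [hstep, if_pos (PySem.Dict.contains_insert_self _ _ _)]
        have hDi : (D.insert r 0).modify r 0 (· + pvMatches e fd) = D.insert r (pvMatches e fd) := by
          unfold PySem.Dict.modify
          rw [PySem.Dict.getD_insert_self, PySem.Dict.insert_insert_self]
          norm_num
        rw [hDi]
        have hi_nd : (D.insert r (pvMatches e fd)).keys.Nodup := PySem.Dict.nodup_keys_insert _ _ _ hnd
        have hi_e : (D.insert r (pvMatches e fd)).contains "" = false := by
          rw [PySem.Dict.contains_insert]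
          simp only [he, Bool.or_false, beq_eq_false_iff_ne, ne_eq]
          exact fun h => hr0 h.symm
        rw [ih _ hi_nd hi_e]
        rw [PySem.Dict.items_insert_of_not_contains _ _ hcf, List.map_append]
        rw [if_pos (by simp [hr0, hc]), PySem.Set.ofList_cons]
        have hfilters : ((l.map pvRace).filter (fun k => k ≠ "" ∧ ¬ (D.insert r (pvMatches e fd)).contains k = true))
            = ((l.map pvRace).filter (fun k => k ≠ "" ∧ ¬ D.contains k = true)).filter (fun k => k ≠ r) := by
          rw [List.filter_filter]
          apply List.filter_congr
          intro k _
          rw [PySem.Dict.contains_insert]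
          by_cases hk : k = r
          · subst hk; simp
          · simp [hk]
        rw [hfilters, pv_ofList_filter_ne]
        rw [List.map_cons, List.append_assoc]
        congr 1
        · apply List.map_congr_left
          intro p hp
          have hkm : p.1 ∈ D.keys := by
            unfold PySem.Dict.keys; exact List.mem_map_of_mem hp
          have hkr : p.1 ≠ r := by
            intro h
            have hco := (PySem.Dict.contains_iff_mem_keys D r).mpr (h ▸ hkm)
            rw [hcf] at hco
            exact Bool.false_ne_true hco
          rw [pv_total_cons, show (r == p.1) = false by simp; exact fun h => hkr h.symm]
          simp
        · -- head: the new key's value is e's matches plus its tail total; tail: e's race touches no other key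
          simp only [List.map_cons, List.map_nil, pv_total_cons]
          simp
          constructor
          · intro h; exact absurd hrdef.symm h
          · intro a _ _ _ hne
            intro h
            exact absurd (hrdef.trans h).symm hne

-- ===== VERDICT (by name: the statement is the Claim_ definition above) =====
theorem census_calc_py_spec : Claim_equal_census_calc_py := by
  intro jd fd _ _
  unfold Spec_census_calc_py census_calc_py census_calc_py_alt
  rw [← pv_main jd fd PySem.Dict.empty (by simp [pysem]) (by simp [pysem])]
  rw [pv_fold_groupby jd fd PySem.Dict.empty (by simp [pysem]) (by simp [pysem])]
  simp only [pvRaceOrder, PySem.List.dedup_eq_ofList]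
  have : ((jd.map pvRace).filter (fun r => r ≠ "" ∧ ¬ (PySem.Dict.empty : PySem.Dict String Int).contains r = true))
      = (jd.map pvRace).filter (fun r => r ≠ "") := by
    apply List.filter_congr
    intro k _
    simp [pysem]
  rw [this]
  simp only [show (PySem.Dict.empty : PySem.Dict String Int).items = [] from rfl,
    List.map_nil, List.nil_append]
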